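-- pv_equiv track=rewrite | github.com/tombombadilom/S4WM-extract-Python | cut-text-by-page.py | map_questions_to_pages
-- ===== SOURCE A (Python) =====
-- def map_questions_to_pages(pages_to_questions, total_questions):
--     questions_to_page_index = []
--     for i in range(len(pages_to_questions) - 1):
--         start_question = pages_to_questions[i]['numero']
--         end_question = pages_to_questions[i + 1]['numero'] - 1
--         page_number = pages_to_questions[i]['page']
--
--         for question_number in range(start_question, end_question + 1):
--             questions_to_page_index.append({
--                 "question": question_number,
--                 "page": page_number
--             })
--
--     # Add the last page
--     questions_to_page_index.extend([{
--         "question": qn,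
--         "page": pages_to_questions[-1]['page']
--     } for qn in range(pages_to_questions[-1]['numero'], total_questions + 1)])
--
--     return questions_to_page_index
-- ===== SOURCE B (Python) =====
-- def map_questions_to_pages(pages_to_questions, total_questions):
--     # Build the mapping BACK-TO-FRONT: walk the pages in reverse, carrying the
--     # exclusive upper boundary of the current segment, and prepend each segment.
--     result = []
--     next_start = total_questions + 1
--     for p in reversed(pages_to_questions):
--         result = [{"question": q, "page": p['page']}
--                   for q in range(p['numero'], next_start)] + result
--         next_start = p['numero']
--     return result
-- ===== Notes on version B (the rewrite author's own statement) =====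
-- stated objective: alternative
-- what changed: B builds the mapping back-to-front: it walks the pages in reverse carrying the exclusive upper boundary of the current segment (starting at total_questions+1) and prepends each segment, so A's forward neighbour-pair index loop plus separate trailing comprehension disappear.
import Mathlib
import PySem

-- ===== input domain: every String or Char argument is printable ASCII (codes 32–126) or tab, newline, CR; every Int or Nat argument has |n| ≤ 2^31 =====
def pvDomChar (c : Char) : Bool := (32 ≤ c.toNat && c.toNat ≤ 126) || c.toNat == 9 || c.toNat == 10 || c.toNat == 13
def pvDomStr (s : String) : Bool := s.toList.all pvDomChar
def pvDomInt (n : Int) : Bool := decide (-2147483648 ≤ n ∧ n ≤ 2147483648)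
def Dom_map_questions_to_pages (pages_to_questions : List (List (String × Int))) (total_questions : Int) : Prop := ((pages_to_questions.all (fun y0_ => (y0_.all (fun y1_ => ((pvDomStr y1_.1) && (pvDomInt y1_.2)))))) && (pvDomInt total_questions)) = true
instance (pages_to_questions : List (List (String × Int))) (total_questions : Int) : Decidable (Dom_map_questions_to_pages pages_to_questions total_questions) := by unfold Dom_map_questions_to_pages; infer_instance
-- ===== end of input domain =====

-- B builds the mapping back-to-front: a reverse walk over the pages carrying the exclusive
-- upper boundary of the current segment, prepending each segment (objective: alternative).


-- d[k] on the assoc-list dict: first match; the .getD 0 default is a totalization guard only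
-- (Python raises KeyError there; Pre_ excludes inputs with a missing key).
def pvLookD (d : List (String × Int)) (k : String) : Int := (d.lookup k).getD 0

-- ===== PORT A =====
def map_questions_to_pages (pages_to_questions : List (List (String × Int))) (total_questions : Int) : List (List (String × Int)) :=
  let questions_to_page_index :=
    (PySem.List.pyRange 0 ((pages_to_questions.length : Int) - 1) 1).foldl (fun acc i =>
      let start_question := pvLookD (PySem.List.pyGetD pages_to_questions i []) "numero"
      let end_question := pvLookD (PySem.List.pyGetD pages_to_questions (i + 1) []) "numero" - 1
      let page_number := pvLookD (PySem.List.pyGetD pages_to_questions i []) "page"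
      (PySem.List.pyRange start_question (end_question + 1) 1).foldl
        (fun acc2 question_number => acc2 ++ [[("question", question_number), ("page", page_number)]]) acc) []
  questions_to_page_index ++
    (PySem.List.pyRange (pvLookD (PySem.List.pyGetD pages_to_questions (-1) []) "numero") (total_questions + 1) 1).map
      (fun qn => [("question", qn), ("page", pvLookD (PySem.List.pyGetD pages_to_questions (-1) []) "page")])

-- ===== PORT B =====
-- state = (next_start, result); the loop 'for p in reversed(pages)' is a foldl over pages.reverse
def map_questions_to_pages_alt (pages_to_questions : List (List (String × Int))) (total_questions : Int) : List (List (String × Int)) :=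
  (pages_to_questions.reverse.foldl (fun st p =>
      (pvLookD p "numero",
       (PySem.List.pyRange (pvLookD p "numero") st.1 1).map
         (fun q => [("question", q), ("page", pvLookD p "page")]) ++ st.2))
    (total_questions + 1, ([] : List (List (String × Int))))).2

-- ===== PRECONDITION & SPEC =====
-- Pre_ excludes exactly the inputs where Python A raises: the empty list (IndexError on
-- pages_to_questions[-1]) and missing keys A reads (KeyError): every entry needs "numero",
-- every entry but the last needs "page", and the last needs "page" only when its question
-- range [numero, total_questions] is nonempty (the comprehension reads it lazily).
def Pre_map_questions_to_pages (pages_to_questions : List (List (String × Int))) (total_questions : Int) : Prop :=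
  pages_to_questions ≠ [] ∧
  pages_to_questions.all (fun d => (d.lookup "numero").isSome) = true ∧
  pages_to_questions.dropLast.all (fun d => (d.lookup "page").isSome) = true ∧
  (pages_to_questions.getLast?.any (fun d =>
      (d.lookup "page").isSome || decide (total_questions + 1 ≤ (d.lookup "numero").getD 0))) = true
instance (pages_to_questions : List (List (String × Int))) (total_questions : Int) : Decidable (Pre_map_questions_to_pages pages_to_questions total_questions) := by unfold Pre_map_questions_to_pages; infer_instance
def pvWitness_map_questions_to_pages : (List (List (String × Int))) × Int :=
  ([[("numero", 1), ("page", 2)], [("numero", 3), ("page", 5)]], 4)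

def Spec_map_questions_to_pages (pages_to_questions : List (List (String × Int))) (total_questions : Int) (out : List (List (String × Int))) : Prop := out = map_questions_to_pages_alt pages_to_questions total_questions
instance (pages_to_questions : List (List (String × Int))) (total_questions : Int) (out : List (List (String × Int))) : Decidable (Spec_map_questions_to_pages pages_to_questions total_questions out) := by unfold Spec_map_questions_to_pages; infer_instance

-- ===== CLAIM (what is proved, stated in full; the proofs are below) =====
def Claim_equal_map_questions_to_pages : Prop := ∀ (pages_to_questions : List (List (String × Int))) (total_questions : Int), Dom_map_questions_to_pages pages_to_questions total_questions → Pre_map_questions_to_pages pages_to_questions total_questions → Spec_map_questions_to_pages pages_to_questions total_questions (map_questions_to_pages pages_to_questions total_questions)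

-- ===== LEMMAS AND PROOFS =====

-- one segment: questions [num p, b) all mapped to p's page
def pvSeg (p : List (String × Int)) (b : Int) : List (List (String × Int)) :=
  (PySem.List.pyRange (pvLookD p "numero") b 1).map
    (fun q => [("question", q), ("page", pvLookD p "page")])

-- the common specification both ports compute (nonempty pages)
def pvF (t : Int) : List (List (String × Int)) → List (List (String × Int))
  | [] => []
  | [p] => pvSeg p (t + 1)
  | p :: q :: rest => pvSeg p (pvLookD q "numero") ++ pvF t (q :: rest)

theorem pv_foldl_foldl (a b h : Int → Int) (L : List Int)
    (acc : List (List (String × Int))) :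
    L.foldl (fun acc i =>
      (PySem.List.pyRange (a i) (b i) 1).foldl
        (fun acc2 q => acc2 ++ [[("question", q), ("page", h i)]]) acc) acc
      = acc ++ L.flatMap (fun i =>
          (PySem.List.pyRange (a i) (b i) 1).map (fun q => [("question", q), ("page", h i)])) := by
  induction L generalizing acc with
  | nil => simp
  | cons x xs ih =>
      simp only [List.foldl_cons, PySem.List.foldl_append_singleton_eq_map,
        PySem.List.foldl_append_eq_flatMap, List.flatMap_cons, List.append_assoc]

-- B's reverse fold computes (boundary of the head, pvF)
theorem pvB_foldr (t : Int) (pages : List (List (String × Int))) :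
    pages.foldr (fun p st =>
        ((pvLookD p "numero" : Int),
         (PySem.List.pyRange (pvLookD p "numero") st.1 1).map
           (fun q => [("question", q), ("page", pvLookD p "page")]) ++ st.2))
      (t + 1, ([] : List (List (String × Int))))
    = ((match pages with | [] => t + 1 | p :: _ => pvLookD p "numero"), pvF t pages) := by
  induction pages with
  | nil => simp [pvF]
  | cons p xs ih =>
      cases xs with
      | nil => simp [pvF, pvSeg]
      | cons q rest => simp [ih, pvF, pvSeg]

-- A's flatMap form equals pvF on nonempty lists
theorem pvA_eq_pvF (t : Int) (pages : List (List (String × Int))) (hne : pages ≠ []) :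
    (PySem.List.pyRange 0 ((pages.length : Int) - 1) 1).flatMap (fun i =>
        (PySem.List.pyRange (pvLookD (PySem.List.pyGetD pages i []) "numero")
            (pvLookD (PySem.List.pyGetD pages (i + 1) []) "numero" - 1 + 1) 1).map
          (fun q => [("question", q), ("page", pvLookD (PySem.List.pyGetD pages i []) "page")]))
      ++ (PySem.List.pyRange (pvLookD (PySem.List.pyGetD pages (-1) []) "numero") (t + 1) 1).map
          (fun qn => [("question", qn), ("page", pvLookD (PySem.List.pyGetD pages (-1) []) "page")])
    = pvF t pages := by
  induction pages with
  | nil => exact absurd rfl hne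
  | cons p xs ih =>
      cases xs with
      | nil =>
          simp [PySem.List.pyRange_one_eq_nil, pvF, pvSeg, PySem.List.pyGetD_neg_one]
      | cons q rest =>
          have hlen : ((p :: q :: rest).length : Int) - 1 = ((q :: rest).length : Int) := by
            simp
          have hlen2 : ((p :: q :: rest).length : Int) = ((q :: rest).length : Int) + 1 := by
            simp
          have hrange : PySem.List.pyRange 0 (((p :: q :: rest).length : Int) - 1) 1
              = 0 :: PySem.List.pyRange 1 (((q :: rest).length : Int)) 1 := by
            rw [hlen, PySem.List.pyRange_one_cons (by simp)]
            norm_num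
          rw [hrange, List.flatMap_cons]
          have hshift : ∀ (f : Int → List (List (String × Int))),
              (PySem.List.pyRange 1 (((q :: rest).length : Int)) 1).flatMap f
              = (PySem.List.pyRange 0 (((q :: rest).length : Int) - 1) 1).flatMap (fun j => f (j + 1)) := by
            intro f
            rw [PySem.List.pyRange_one, PySem.List.pyRange_one]
            rw [List.flatMap_map, List.flatMap_map]
            simp only [sub_zero]
            apply List.flatMap_congr
            intro k _
            congr 1
            omega
          rw [hshift]
          have hget : ∀ (j : Int), 0 ≤ j → j < ((q :: rest).length : Int) →
              PySem.List.pyGetD (p :: q :: rest) (j + 1) ([] : List (String × Int))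
              = PySem.List.pyGetD (q :: rest) j ([] : List (String × Int)) := by
            intro j hj hlt
            rw [PySem.List.pyGetD_eq_getElem _ _ (by omega) (by rw [hlen2]; omega),
                PySem.List.pyGetD_eq_getElem _ _ hj (by omega)]
            have hts : (j + 1).toNat = j.toNat + 1 := by omega
            simp [hts]
          have hneg : PySem.List.pyGetD (p :: q :: rest) (-1) ([] : List (String × Int))
              = PySem.List.pyGetD (q :: rest) (-1) ([] : List (String × Int)) := by
            rw [PySem.List.pyGetD_neg_one _ _ (by simp), PySem.List.pyGetD_neg_one _ _ (by simp)]
            exact List.getLast_cons (by simp)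
          have hcongr : (PySem.List.pyRange 0 (((q :: rest).length : Int) - 1) 1).flatMap (fun j =>
              (PySem.List.pyRange (pvLookD (PySem.List.pyGetD (p :: q :: rest) (j + 1) []) "numero")
                  (pvLookD (PySem.List.pyGetD (p :: q :: rest) (j + 1 + 1) []) "numero" - 1 + 1) 1).map
                (fun q' => [("question", q'), ("page", pvLookD (PySem.List.pyGetD (p :: q :: rest) (j + 1) []) "page")]))
              = (PySem.List.pyRange 0 (((q :: rest).length : Int) - 1) 1).flatMap (fun j =>
              (PySem.List.pyRange (pvLookD (PySem.List.pyGetD (q :: rest) j []) "numero")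
                  (pvLookD (PySem.List.pyGetD (q :: rest) (j + 1) []) "numero" - 1 + 1) 1).map
                (fun q' => [("question", q'), ("page", pvLookD (PySem.List.pyGetD (q :: rest) j []) "page")])) := by
            apply List.flatMap_congr
            intro j hj
            rw [PySem.List.mem_pyRange_one] at hj
            rw [hget j hj.1 (by omega), hget (j + 1) (by omega) (by omega)]
          rw [hcongr, hneg, List.append_assoc, ih (by simp)]
          show pvSeg _ _ ++ pvF t (q :: rest) = pvF t (p :: q :: rest)
          have h0 : PySem.List.pyGetD (p :: q :: rest) 0 ([] : List (String × Int)) = p := by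
            rw [PySem.List.pyGetD_eq_getElem _ _ (by norm_num) (by rw [hlen2]; omega)]
            simp
          have h1 : PySem.List.pyGetD (p :: q :: rest) (0 + 1) ([] : List (String × Int)) = q := by
            rw [PySem.List.pyGetD_eq_getElem _ _ (by norm_num) (by simp [List.length_cons])]
            simp
          rw [pvF]
          congr 1
          simp only [h0, h1, pvSeg, sub_add_cancel]

-- ===== VERDICT (by name: the statement is the Claim_ definition above) =====
theorem map_questions_to_pages_spec : Claim_equal_map_questions_to_pages := by
  intro pages t _dom hpre
  obtain ⟨hne, -, -, -⟩ := hpre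
  unfold Spec_map_questions_to_pages map_questions_to_pages map_questions_to_pages_alt
  rw [List.foldl_reverse]
  rw [pvB_foldr t pages]
  rw [pv_foldl_foldl
    (fun i => pvLookD (PySem.List.pyGetD pages i []) "numero")
    (fun i => pvLookD (PySem.List.pyGetD pages (i + 1) []) "numero" - 1 + 1)
    (fun i => pvLookD (PySem.List.pyGetD pages i []) "page")]
  rw [List.nil_append]
  exact pvA_eq_pvF t pages hne
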